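-- pv_equiv track=rewrite | github.com/chethanaaa/ChordMaster | guitar_tutor.py | recognize_chord
-- ===== SOURCE A (Python) =====
-- def recognize_chord(fingers):
--     """
--     Recognize the chord based on finger positions.
--
--     :param fingers: The detected finger positions.
--     :return: The recognized chord name.
--     """
--     # Example chord mappings (fret position: (string, fret))
--     chord_mappings = {
--         'C': [(1, 0), (2, 1), (3, 0), (4, 2), (5, 3), (6, 0)],
--         'G': [(1, 3), (2, 0), (3, 0), (4, 0), (5, 2), (6, 3)],
--         'Am': [(1, 0), (2, 1), (3, 2), (4, 2), (5, 0), (6, 0)],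
--         'F': [(1, 1), (2, 1), (3, 2), (4, 3), (5, 3), (6, 1)]
--     }
--
--     # Convert finger positions to a set for comparison
--     finger_set = set(fingers)
--
--     for chord, positions in chord_mappings.items():
--         if finger_set == set(positions):
--             return chord
--
--     return "Unknown"
-- ===== SOURCE B (Python) =====
-- # Fingerprint approach: validate that the (deduplicated) positions cover strings
-- # 1..6 exactly once, then read off the fret pattern per string and look the
-- # 6-fret shape up in a small table.
-- _SHAPES = {
--     (0, 1, 0, 2, 3, 0): 'C',
--     (3, 0, 0, 0, 2, 3): 'G',
--     (0, 1, 2, 2, 0, 0): 'Am',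
--     (1, 1, 2, 3, 3, 1): 'F',
-- }
--
--
-- def recognize_chord(fingers):
--     """
--     Recognize the chord based on finger positions.
--
--     :param fingers: The detected finger positions.
--     :return: The recognized chord name.
--     """
--     fs = set(fingers)
--     if len(fs) != 6 or {s for s, _ in fs} != {1, 2, 3, 4, 5, 6}:
--         return "Unknown"
--     frets = tuple(f for _, f in sorted(fs, key=lambda p: p[0]))
--     return _SHAPES.get(frets, "Unknown")
-- ===== Notes on version B (the rewrite author's own statement) =====
-- stated objective: alternative
-- what changed: Instead of scanning the chord dict comparing set(fingers) with each chord's position set, B validates that the deduplicated positions cover strings 1..6 exactly once, reads off the per-string fret pattern, and looks that 6-fret shape up in a table keyed by fret tuples.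
import Mathlib
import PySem

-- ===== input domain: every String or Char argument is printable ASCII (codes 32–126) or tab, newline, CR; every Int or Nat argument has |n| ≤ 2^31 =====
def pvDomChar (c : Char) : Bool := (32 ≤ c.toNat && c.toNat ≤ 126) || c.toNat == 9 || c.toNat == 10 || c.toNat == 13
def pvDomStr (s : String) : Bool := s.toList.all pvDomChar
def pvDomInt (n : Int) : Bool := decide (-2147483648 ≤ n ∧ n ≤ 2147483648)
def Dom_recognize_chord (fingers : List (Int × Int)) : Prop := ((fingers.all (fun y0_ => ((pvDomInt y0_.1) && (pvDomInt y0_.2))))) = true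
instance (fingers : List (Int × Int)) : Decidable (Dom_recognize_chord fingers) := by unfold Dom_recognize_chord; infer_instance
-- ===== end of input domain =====

-- B replaces A's per-chord set-equality scan by a fingerprint: validate that the deduplicated
-- positions cover strings 1..6 exactly once, read off the per-string fret pattern, and look the
-- 6-fret shape up in a table keyed by fret tuples (alternative decomposition; same return value).

-- ===== PORT A =====
-- chord_mappings.items(), in insertion order
def pvChordMappingsA : List (String × List (Int × Int)) :=
  [("C", [(1, 0), (2, 1), (3, 0), (4, 2), (5, 3), (6, 0)]),
   ("G", [(1, 3), (2, 0), (3, 0), (4, 0), (5, 2), (6, 3)]),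
   ("Am", [(1, 0), (2, 1), (3, 2), (4, 2), (5, 0), (6, 0)]),
   ("F", [(1, 1), (2, 1), (3, 2), (4, 3), (5, 3), (6, 1)])]

-- the 'for chord, positions in …: if finger_set == set(positions): return chord' loop
def pvChordLoopA (fingerSet : PySem.Set (Int × Int)) :
    List (String × List (Int × Int)) → String
  | [] => "Unknown"
  | (chord, positions) :: rest =>
      if PySem.Set.equal fingerSet (PySem.Set.ofList positions) then chord
      else pvChordLoopA fingerSet rest

def recognize_chord (fingers : List (Int × Int)) : String :=
  pvChordLoopA (PySem.Set.ofList fingers) pvChordMappingsA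

-- ===== PORT B =====
-- _SHAPES: 6-fret shape (frets of strings 1..6 in order) -> chord name
def pvShapesB : List (List Int × String) :=
  [([0, 1, 0, 2, 3, 0], "C"),
   ([3, 0, 0, 0, 2, 3], "G"),
   ([0, 1, 2, 2, 0, 0], "Am"),
   ([1, 1, 2, 3, 3, 1], "F")]

def recognize_chord_alt (fingers : List (Int × Int)) : String :=
  let fs : PySem.Set (Int × Int) := PySem.Set.ofList fingers
  -- if len(fs) != 6 or {s for s, _ in fs} != {1, 2, 3, 4, 5, 6}: return "Unknown"
  if fs.length ≠ 6 ∨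
      PySem.Set.equal (PySem.Set.ofList (fs.map Prod.fst))
        (PySem.Set.ofList [1, 2, 3, 4, 5, 6]) = false then "Unknown"
  else
    -- frets = tuple(f for _, f in sorted(fs, key=lambda p: p[0]))
    let frets := (PySem.List.sorted fs (fun p => p.1) false).map Prod.snd
    -- _SHAPES.get(frets, "Unknown")
    match pvShapesB.find? (fun kv => kv.1 == frets) with
    | some kv => kv.2
    | none => "Unknown"

-- ===== PRECONDITION & SPEC =====
def Spec_recognize_chord (fingers : List (Int × Int)) (out : String) : Prop := out = recognize_chord_alt fingers
instance (fingers : List (Int × Int)) (out : String) : Decidable (Spec_recognize_chord fingers out) := by unfold Spec_recognize_chord; infer_instance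

-- ===== CLAIM (what is proved, stated in full; the proofs are below) =====
def Claim_equal_recognize_chord : Prop := ∀ (fingers : List (Int × Int)), Dom_recognize_chord fingers → Spec_recognize_chord fingers (recognize_chord fingers)

-- ===== LEMMAS AND PROOFS =====

-- A's per-chord condition ⟺ B's fingerprint condition, for any chord whose positions P
-- list strings 1..6 in order.
theorem pvEntry_iff (fingers : List (Int × Int)) (P : List (Int × Int)) (shape : List Int)
    (hfst : P.map Prod.fst = [1, 2, 3, 4, 5, 6]) (hsnd : P.map Prod.snd = shape) :
    (PySem.Set.equal (PySem.Set.ofList fingers) (PySem.Set.ofList P) = true) ↔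
      ((PySem.Set.ofList fingers).length = 6 ∧
       PySem.Set.equal (PySem.Set.ofList ((PySem.Set.ofList fingers).map Prod.fst))
         (PySem.Set.ofList [1, 2, 3, 4, 5, 6]) = true ∧
       (PySem.List.sorted (PySem.Set.ofList fingers) (fun p => p.1) false).map Prod.snd = shape) := by
  have hPnodup : P.Nodup := by
    have hm : (P.map Prod.fst).Nodup := by rw [hfst]; decide
    exact hm.of_map
  have hPlen : P.length = 6 := by
    have := congrArg List.length hfst; simpa using this
  have hsnodup : (PySem.Set.ofList fingers).Nodup := PySem.Set.nodup_ofList fingers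
  set s := PySem.Set.ofList fingers with hs
  constructor
  · intro h
    have hmem : ∀ x, x ∈ s ↔ x ∈ P := by
      intro x
      have hx := (PySem.Set.equal_iff _ _).mp h x
      simpa [PySem.Set.mem_ofList] using hx
    have hperm : s.Perm P := (List.perm_ext_iff_of_nodup hsnodup hPnodup).mpr hmem
    have hPpair : P.Pairwise (fun a b => a.1 < b.1) := by
      have h6 : (([1,2,3,4,5,6] : List Int)).Pairwise (· < ·) := by decide
      rw [← hfst] at h6
      exact (List.pairwise_map).mp h6
    have hsorted : PySem.List.sorted s (fun p => p.1) false = P :=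
      PySem.List.sorted_eq_of_perm_of_pairwise_lt s P (fun p => p.1) hperm.symm hPpair
    refine ⟨by rw [hperm.length_eq, hPlen], ?_, by rw [hsorted, hsnd]⟩
    rw [PySem.Set.equal_iff]
    intro x
    have hmapperm : (s.map Prod.fst).Perm [1,2,3,4,5,6] := hfst ▸ hperm.map Prod.fst
    simp only [PySem.Set.mem_ofList]
    exact hmapperm.mem_iff
  · rintro ⟨hlen, hstr, hshape⟩
    have hmemf : ∀ x, x ∈ s.map Prod.fst ↔ x ∈ ([1,2,3,4,5,6] : List Int) := by
      intro x
      have hx := (PySem.Set.equal_iff _ _).mp hstr x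
      simpa [PySem.Set.mem_ofList] using hx
    have hsub : ([1,2,3,4,5,6] : List Int) ⊆ s.map Prod.fst := fun x hx => (hmemf x).mpr hx
    have hnodup6 : (([1,2,3,4,5,6] : List Int)).Nodup := by decide
    have hsp : List.Subperm ([1,2,3,4,5,6] : List Int) (s.map Prod.fst) := hnodup6.subperm hsub
    have hlenmap : (s.map Prod.fst).length = 6 := by simpa using hlen
    have hperm6 : (s.map Prod.fst).Perm [1,2,3,4,5,6] :=
      (hsp.perm_of_length_le (by simp [hlenmap])).symm
    have htperm : (PySem.List.sorted s (fun p => p.1) false).Perm s :=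
      PySem.List.sorted_perm s (fun p => p.1) false
    set t := PySem.List.sorted s (fun p => p.1) false with ht
    have htfp : (t.map Prod.fst).Perm [1,2,3,4,5,6] := (htperm.map Prod.fst).trans hperm6
    have hle : (t.map Prod.fst).Pairwise (· ≤ ·) := by
      have := PySem.List.sorted_map_key_pairwise s (fun p => p.1)
      simpa [← ht] using this
    have h6le : (([1,2,3,4,5,6] : List Int)).Pairwise (· ≤ ·) := by decide
    have htf : t.map Prod.fst = [1,2,3,4,5,6] := List.Perm.eq_of_pairwise' hle h6le htfp
    have htlen : t.length = 6 := by
      have := congrArg List.length htf; simpa using this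
    have htsnd : t.map Prod.snd = P.map Prod.snd := hshape.trans hsnd.symm
    have htfst : t.map Prod.fst = P.map Prod.fst := htf.trans hfst.symm
    have htP : t = P := by
      apply List.ext_getElem (by rw [htlen, hPlen])
      intro i h1 h2
      have hf1 : t[i].1 = P[i].1 := by
        have := congrArg (fun l => l[i]?) htfst
        simpa [List.getElem?_map, List.getElem?_eq_getElem, h1, h2] using this
      have hf2 : t[i].2 = P[i].2 := by
        have := congrArg (fun l => l[i]?) htsnd
        simpa [List.getElem?_map, List.getElem?_eq_getElem, h1, h2] using this
      exact Prod.ext hf1 hf2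
    have hpermP : s.Perm P := (htperm.symm.trans (htP ▸ List.Perm.refl t))
    rw [PySem.Set.equal_iff]
    intro x
    simp only [PySem.Set.mem_ofList]
    exact hpermP.mem_iff

theorem recognize_chord_eq_alt (fingers : List (Int × Int)) :
    recognize_chord fingers = recognize_chord_alt fingers := by
  have eC := pvEntry_iff fingers [(1,0),(2,1),(3,0),(4,2),(5,3),(6,0)] [0,1,0,2,3,0] (by decide) (by decide)
  have eG := pvEntry_iff fingers [(1,3),(2,0),(3,0),(4,0),(5,2),(6,3)] [3,0,0,0,2,3] (by decide) (by decide)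
  have eA := pvEntry_iff fingers [(1,0),(2,1),(3,2),(4,2),(5,0),(6,0)] [0,1,2,2,0,0] (by decide) (by decide)
  have eF := pvEntry_iff fingers [(1,1),(2,1),(3,2),(4,3),(5,3),(6,1)] [1,1,2,3,3,1] (by decide) (by decide)
  set s := PySem.Set.ofList fingers with hs
  by_cases hlen : s.length = 6
  · by_cases hstr : PySem.Set.equal (PySem.Set.ofList (s.map Prod.fst))
        (PySem.Set.ofList [1, 2, 3, 4, 5, 6]) = true
    · set frets := (PySem.List.sorted s (fun p => p.1) false).map Prod.snd with hf
      by_cases h1 : frets = [0,1,0,2,3,0]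
      · have hC : PySem.Set.equal s (PySem.Set.ofList [(1,0),(2,1),(3,0),(4,2),(5,3),(6,0)]) = true :=
          eC.mpr ⟨hlen, hstr, h1⟩
        simp [recognize_chord, recognize_chord_alt, pvChordLoopA, pvChordMappingsA, pvShapesB,
          ← hs, ← hf, hC, hlen, hstr, h1]
      · have hC : PySem.Set.equal s (PySem.Set.ofList [(1,0),(2,1),(3,0),(4,2),(5,3),(6,0)]) = false :=
          Bool.eq_false_iff.mpr (fun h => h1 (eC.mp h).2.2)
        by_cases h2 : frets = [3,0,0,0,2,3]
        · have hG : PySem.Set.equal s (PySem.Set.ofList [(1,3),(2,0),(3,0),(4,0),(5,2),(6,3)]) = true :=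
            eG.mpr ⟨hlen, hstr, h2⟩
          simp [recognize_chord, recognize_chord_alt, pvChordLoopA, pvChordMappingsA, pvShapesB,
            ← hs, ← hf, hC, hG, hlen, hstr, h2]
        · have hG : PySem.Set.equal s (PySem.Set.ofList [(1,3),(2,0),(3,0),(4,0),(5,2),(6,3)]) = false :=
            Bool.eq_false_iff.mpr (fun h => h2 (eG.mp h).2.2)
          by_cases h3 : frets = [0,1,2,2,0,0]
          · have hA : PySem.Set.equal s (PySem.Set.ofList [(1,0),(2,1),(3,2),(4,2),(5,0),(6,0)]) = true :=
              eA.mpr ⟨hlen, hstr, h3⟩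
            simp [recognize_chord, recognize_chord_alt, pvChordLoopA, pvChordMappingsA, pvShapesB,
              ← hs, ← hf, hC, hG, hA, hlen, hstr, h3]
          · have hA : PySem.Set.equal s (PySem.Set.ofList [(1,0),(2,1),(3,2),(4,2),(5,0),(6,0)]) = false :=
              Bool.eq_false_iff.mpr (fun h => h3 (eA.mp h).2.2)
            by_cases h4 : frets = [1,1,2,3,3,1]
            · have hF : PySem.Set.equal s (PySem.Set.ofList [(1,1),(2,1),(3,2),(4,3),(5,3),(6,1)]) = true :=
                eF.mpr ⟨hlen, hstr, h4⟩
              simp [recognize_chord, recognize_chord_alt, pvChordLoopA, pvChordMappingsA, pvShapesB,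
                ← hs, ← hf, hC, hG, hA, hF, hlen, hstr, h4]
            · have hF : PySem.Set.equal s (PySem.Set.ofList [(1,1),(2,1),(3,2),(4,3),(5,3),(6,1)]) = false :=
                Bool.eq_false_iff.mpr (fun h => h4 (eF.mp h).2.2)
              have hb1 : (([0,1,0,2,3,0] : List Int) == frets) = false :=
                beq_eq_false_iff_ne.mpr (fun h => h1 h.symm)
              have hb2 : (([3,0,0,0,2,3] : List Int) == frets) = false :=
                beq_eq_false_iff_ne.mpr (fun h => h2 h.symm)
              have hb3 : (([0,1,2,2,0,0] : List Int) == frets) = false :=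
                beq_eq_false_iff_ne.mpr (fun h => h3 h.symm)
              have hb4 : (([1,1,2,3,3,1] : List Int) == frets) = false :=
                beq_eq_false_iff_ne.mpr (fun h => h4 h.symm)
              simp [recognize_chord, recognize_chord_alt, pvChordLoopA, pvChordMappingsA, pvShapesB,
                ← hs, ← hf, hC, hG, hA, hF, hlen, hstr, hb1, hb2, hb3, hb4]
    · have hstr' := Bool.eq_false_iff.mpr hstr
      have hC := Bool.eq_false_iff.mpr (fun h => hstr ((eC.mp h).2.1))
      have hG := Bool.eq_false_iff.mpr (fun h => hstr ((eG.mp h).2.1))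
      have hA := Bool.eq_false_iff.mpr (fun h => hstr ((eA.mp h).2.1))
      have hF := Bool.eq_false_iff.mpr (fun h => hstr ((eF.mp h).2.1))
      simp [recognize_chord, recognize_chord_alt, pvChordLoopA, pvChordMappingsA,
        ← hs, hC, hG, hA, hF, hstr']
  · have hC := Bool.eq_false_iff.mpr (fun h => hlen ((eC.mp h).1))
    have hG := Bool.eq_false_iff.mpr (fun h => hlen ((eG.mp h).1))
    have hA := Bool.eq_false_iff.mpr (fun h => hlen ((eA.mp h).1))
    have hF := Bool.eq_false_iff.mpr (fun h => hlen ((eF.mp h).1))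
    simp [recognize_chord, recognize_chord_alt, pvChordLoopA, pvChordMappingsA,
      ← hs, hC, hG, hA, hF, hlen]

-- ===== VERDICT (by name: the statement is the Claim_ definition above) =====
theorem recognize_chord_spec : Claim_equal_recognize_chord := by
  intro fingers _
  exact recognize_chord_eq_alt fingers
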